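-- pv_equiv track=rewrite | github.com/Johnnyevans32/deg-x-api | core/utils/algorithms.py | get_river_sizes
-- ===== SOURCE A (Python) =====
-- def get_river_sizes(matrix: list[list[int]]):
--     visited = [[False for num in arr_mat] for arr_mat in matrix]
--     sizes = []
--     for i in range(len(matrix)):
--         for j in range(len(matrix[i])):
--             if visited[i][j]:
--                 continue
--             if matrix[i][j] == 0:
--                 continue
--             transverse_river_size = depth_first_transverse(i, j, matrix, visited)
--             if transverse_river_size > 0:
--                 sizes.append(transverse_river_size)
--
--     return sizes
--
-- def depth_first_transverse(i, j, matrix, visited):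
--     current_river_size = 0
--     nodes_to_search = [[i, j]]
--     while len(nodes_to_search) > 0:
--         current_node = nodes_to_search.pop()
--         i, j = current_node
--         if visited[i][j]:
--             continue
--         visited[i][j] = True
--         if matrix[i][j] == 0:
--             continue
--
--         current_river_size += 1
--
--         unvisted = get_unvisited_nodes(i, j, matrix, visited)
--         nodes_to_search += unvisted
--
--     return current_river_size
--
-- def get_unvisited_nodes(i, j, matrix, visited):
--     unvisited_nodes = []
--     if i > 0 and not visited[i - 1][j]:
--         unvisited_nodes.append([i - 1, j])
--
--     if i < len(matrix) - 1 and not visited[i + 1][j]: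
--         unvisited_nodes.append([i + 1, j])
--
--     if j > 0 and not visited[i][j - 1]:
--         unvisited_nodes.append([i, j - 1])
--
--     if j < len(matrix[i]) - 1 and not visited[i][j + 1]:
--         unvisited_nodes.append([i, j + 1])
--
--     return unvisited_nodes
-- ===== SOURCE B (Python) =====
-- def get_river_sizes(matrix):
--     # Disjoint-set (quick-find) connected components: no DFS/stack/visited flood fill.
--     lab = {}
--     for i in range(len(matrix)):
--         for j in range(len(matrix[i])):
--             if matrix[i][j] != 0:
--                 lab[(i, j)] = (i, j)
--     for i in range(len(matrix)):
--         for j in range(len(matrix[i])):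
--             if matrix[i][j] == 0:
--                 continue
--             if j + 1 < len(matrix[i]) and matrix[i][j + 1] != 0:
--                 _merge(lab, (i, j), (i, j + 1))
--             if i + 1 < len(matrix) and j < len(matrix[i + 1]) and matrix[i + 1][j] != 0:
--                 _merge(lab, (i, j), (i + 1, j))
--     sizes = []
--     seen = set()
--     for i in range(len(matrix)):
--         for j in range(len(matrix[i])):
--             if matrix[i][j] == 0:
--                 continue
--             r = lab[(i, j)]
--             if r not in seen:
--                 seen.add(r)
--                 sizes.append(sum(1 for c in lab if lab[c] == r))
--     return sizes
--
-- def _merge(lab, a, b):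
--     ra, rb = lab[a], lab[b]
--     if ra != rb:
--         for c in lab:
--             lab[c] = ra if lab[c] == rb else lab[c]
-- ===== Notes on version B (the rewrite author's own statement) =====
-- stated objective: alternative
-- what changed: Replaces the stack-based DFS flood fill with per-cell visited marking by a disjoint-set (quick-find) label table: every nonzero cell gets a label, right/down neighbour pairs are merged by relabelling, and sizes are emitted by scanning cells row-major and counting each label class at its first-encountered root.
import Mathlib
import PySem

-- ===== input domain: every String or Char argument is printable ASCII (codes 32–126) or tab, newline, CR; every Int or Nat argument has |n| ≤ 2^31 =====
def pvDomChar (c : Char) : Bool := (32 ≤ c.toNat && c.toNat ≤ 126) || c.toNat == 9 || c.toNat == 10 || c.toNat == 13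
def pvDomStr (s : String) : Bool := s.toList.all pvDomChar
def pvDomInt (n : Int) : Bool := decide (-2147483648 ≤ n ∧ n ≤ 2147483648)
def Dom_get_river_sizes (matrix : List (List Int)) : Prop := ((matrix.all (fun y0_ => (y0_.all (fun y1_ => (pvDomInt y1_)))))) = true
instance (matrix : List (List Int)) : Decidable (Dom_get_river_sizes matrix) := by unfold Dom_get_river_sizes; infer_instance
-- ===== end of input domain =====

-- B replaces A's stack-based DFS flood fill by a disjoint-set (quick-find) label table; the theorems
-- below are about the RETURN value only (A also fills its local `visited`, which no caller sees).

-- ===== PORT A =====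
def pvVisGet (v : List (List Bool)) (i j : Nat) : Bool := (v.getD i []).getD j true
def pvVisSet (v : List (List Bool)) (i j : Nat) : List (List Bool) := v.set i ((v.getD i []).set j true)
def pvMatGet (m : List (List Int)) (i j : Nat) : Int := (m.getD i []).getD j 0
def pvFalseCount (v : List (List Bool)) : Nat := (v.map (fun r => r.count false)).sum

-- termination helper for the port of the while loop (marking an unvisited cell shrinks the count)
theorem pvCountFalseSetLt (r : List Bool) (j : Nat) (hj : j < r.length) (h : r[j] = false) :
    (r.set j true).count false < r.count false := by
  induction r generalizing j with
  | nil => simp at hj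
  | cons a t ih =>
    cases j with
    | zero =>
      simp only [List.getElem_cons_zero] at h
      subst h
      simp
    | succ n =>
      simp only [List.getElem_cons_succ] at h
      have := ih n (by simpa using hj) h
      simp [List.count_cons]
      omega

theorem pvFalseCount_set_lt (v : List (List Bool)) (i j : Nat)
    (h : pvVisGet v i j = false) : pvFalseCount (pvVisSet v i j) < pvFalseCount v := by
  have hi : i < v.length := by
    by_contra hi
    simp [pvVisGet, List.getD_eq_getElem?_getD, List.getElem?_eq_none (by omega : v.length ≤ i)] at h
  have hj : j < v[i].length := by
    by_contra hj
    simp [pvVisGet, List.getD_eq_getElem?_getD, List.getElem?_eq_getElem hi,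
      List.getElem?_eq_none (by omega : v[i].length ≤ j)] at h
  have hval : v[i][j] = false := by
    simpa [pvVisGet, List.getD_eq_getElem?_getD, List.getElem?_eq_getElem, hi, hj] using h
  have hcnt := pvCountFalseSetLt v[i] j hj hval
  unfold pvFalseCount pvVisSet
  rw [List.getD_eq_getElem v [] hi]
  clear h hval hj
  induction v generalizing i with
  | nil => simp at hi
  | cons a t ih =>
    cases i with
    | zero => simp at hcnt ⊢; omega
    | succ n =>
      simp only [List.getElem_cons_succ] at hcnt ⊢
      simp only [List.set_cons_succ, List.map_cons, List.sum_cons]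
      have := ih n (by simpa using hi) hcnt
      omega

def get_unvisited_nodes (i j : Nat) (matrix : List (List Int)) (visited : List (List Bool)) :
    List (Nat × Nat) :=
  (if 0 < i ∧ pvVisGet visited (i-1) j = false then [(i-1, j)] else []) ++
  (if i < matrix.length - 1 ∧ pvVisGet visited (i+1) j = false then [(i+1, j)] else []) ++
  (if 0 < j ∧ pvVisGet visited i (j-1) = false then [(i, j-1)] else []) ++
  (if j < (matrix.getD i []).length - 1 ∧ pvVisGet visited i (j+1) = false then [(i, j+1)] else [])

-- Python's `while len(nodes_to_search) > 0` loop; the stack is held top-first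
-- (Python's list.pop() pops the LAST element, so `+= unvisited` pushes `unvisited.reverse` on top).
-- Out-of-range visited[,] reads default to `true` here; inside Pre_ they never occur (Python raises there).
def dftLoop (matrix : List (List Int)) (stack : List (Nat × Nat)) (visited : List (List Bool))
    (size : Int) : Int × List (List Bool) :=
  match stack with
  | [] => (size, visited)
  | (i, j) :: rest =>
    if pvVisGet visited i j then dftLoop matrix rest visited size
    else
      let visited' := pvVisSet visited i j
      if pvMatGet matrix i j == 0 then dftLoop matrix rest visited' size
      else dftLoop matrix ((get_unvisited_nodes i j matrix visited').reverse ++ rest) visited' (size + 1)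
  termination_by (pvFalseCount visited, stack.length)
  decreasing_by
  · exact Prod.Lex.right _ (by simp)
  · rename_i h _
    exact Prod.Lex.left _ _ (pvFalseCount_set_lt _ _ _ (by simpa using h))
  · rename_i h _
    exact Prod.Lex.left _ _ (pvFalseCount_set_lt _ _ _ (by simpa using h))

def depth_first_transverse (i j : Nat) (matrix : List (List Int)) (visited : List (List Bool)) :
    Int × List (List Bool) :=
  dftLoop matrix [(i, j)] visited 0

def get_river_sizes (matrix : List (List Int)) : List Int :=
  let visited0 := matrix.map (fun row => row.map (fun _ => false))
  ((List.range matrix.length).foldl (fun st i =>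
    (List.range (matrix.getD i []).length).foldl (fun st j =>
      if pvVisGet st.1 i j then st
      else if pvMatGet matrix i j == 0 then st
      else
        let r := depth_first_transverse i j matrix st.1
        if r.1 > 0 then (r.2, st.2 ++ [r.1]) else (r.2, st.2)) st)
    (visited0, ([] : List Int))).2

-- ===== PORT B =====
-- quick-find merge: relabel every cell of b's class with a's label (the in-place
-- `for c in lab: lab[c] = ...` value loop keeps keys and their order, so it is items.map)
def pvMerge (lab : PySem.Dict (Nat × Nat) (Nat × Nat)) (a b : Nat × Nat) :
    PySem.Dict (Nat × Nat) (Nat × Nat) :=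
  let ra := lab.getD a a  -- lab[a]; a is always a present key here, so the default is never consulted
  let rb := lab.getD b b
  if ra ≠ rb then
    PySem.Dict.mk (lab.items.map (fun p => if p.2 = rb then (p.1, ra) else p))
  else lab

def get_river_sizes_alt (matrix : List (List Int)) : List Int :=
  let lab0 := (List.range matrix.length).foldl (fun lab i =>
    (List.range (matrix.getD i []).length).foldl (fun lab j =>
      if pvMatGet matrix i j ≠ 0 then lab.insert (i, j) (i, j) else lab) lab)
    (PySem.Dict.empty : PySem.Dict (Nat × Nat) (Nat × Nat))
  let lab := (List.range matrix.length).foldl (fun lab i =>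
    (List.range (matrix.getD i []).length).foldl (fun lab j =>
      if pvMatGet matrix i j == 0 then lab
      else
        let lab' := if j + 1 < (matrix.getD i []).length ∧ pvMatGet matrix i (j+1) ≠ 0 then
            pvMerge lab (i, j) (i, j+1) else lab
        if i + 1 < matrix.length ∧ j < (matrix.getD (i+1) []).length ∧ pvMatGet matrix (i+1) j ≠ 0 then
          pvMerge lab' (i, j) (i+1, j) else lab') lab) lab0
  ((List.range matrix.length).foldl (fun st i =>
    (List.range (matrix.getD i []).length).foldl (fun st j =>
      if pvMatGet matrix i j == 0 then st
      else
        let r := lab.getD (i, j) (i, j)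
        if PySem.Set.contains st.2 r then st
        else (st.1 ++ [((lab.keys.countP (fun c => lab.getD c c = r)) : Int)], PySem.Set.add st.2 r)) st)
    (([] : List Int), (PySem.Set.empty : PySem.Set (Nat × Nat)))).1

-- ===== PRECONDITION & SPEC =====
-- Pre_ excludes exactly the matrices on which A raises IndexError: a nonzero cell (i, j) whose
-- neighbouring row above or below exists but is shorter than j+1 (A then probes visited[i∓1][j]).
def Pre_get_river_sizes (matrix : List (List Int)) : Prop :=
  ∀ i < matrix.length, ∀ j < (matrix.getD i []).length, (matrix.getD i []).getD j 0 ≠ 0 →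
    (0 < i → j < (matrix.getD (i-1) []).length) ∧
    (i + 1 < matrix.length → j < (matrix.getD (i+1) []).length)
instance (matrix : List (List Int)) : Decidable (Pre_get_river_sizes matrix) := by
  unfold Pre_get_river_sizes; infer_instance
def pvWitness_get_river_sizes : List (List Int) := [[1, 0], [1, 1]]

def Spec_get_river_sizes (matrix : List (List Int)) (out : List Int) : Prop :=
  out = get_river_sizes_alt matrix
instance (matrix : List (List Int)) (out : List Int) : Decidable (Spec_get_river_sizes matrix out) := by
  unfold Spec_get_river_sizes; infer_instance

-- ===== CLAIM (what is proved, stated in full; the proofs are below) =====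
def Claim_equal_get_river_sizes : Prop := ∀ (matrix : List (List Int)), Dom_get_river_sizes matrix → Pre_get_river_sizes matrix → Spec_get_river_sizes matrix (get_river_sizes matrix)

-- ===== LEMMAS AND PROOFS =====


-- Semantic layer: values, cells, adjacency, connectivity --------------------------------------
def pvVal (m : List (List Int)) (p : Nat × Nat) : Int := pvMatGet m p.1 p.2
def pvNz (m : List (List Int)) (p : Nat × Nat) : Prop := pvVal m p ≠ 0
def pvValid (m : List (List Int)) (p : Nat × Nat) : Prop :=
  p.1 < m.length ∧ p.2 < (m.getD p.1 []).length
def pvAdjacent (p q : Nat × Nat) : Prop :=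
  (p.1 = q.1 ∧ (p.2 + 1 = q.2 ∨ q.2 + 1 = p.2)) ∨ (p.2 = q.2 ∧ (p.1 + 1 = q.1 ∨ q.1 + 1 = p.1))
def pvAdj (m : List (List Int)) (p q : Nat × Nat) : Prop := pvNz m p ∧ pvNz m q ∧ pvAdjacent p q
def pvConn (m : List (List Int)) : Nat × Nat → Nat × Nat → Prop := Relation.ReflTransGen (pvAdj m)
def pvCells (m : List (List Int)) : List (Nat × Nat) :=
  (List.range m.length).flatMap fun i => (List.range (m.getD i []).length).map fun j => (i, j)
def pvNzCells (m : List (List Int)) : List (Nat × Nat) :=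
  (pvCells m).filter fun p => decide (pvVal m p ≠ 0)

theorem pvNz_valid {m : List (List Int)} {p : Nat × Nat} (h : pvNz m p) : pvValid m p := by
  unfold pvNz pvVal pvMatGet at h
  constructor
  · by_contra hc
    apply h
    rw [List.getD_eq_default _ _ (by omega : m.length ≤ p.1)]
    rfl
  · by_contra hc
    apply h
    exact List.getD_eq_default _ _ (by omega : (m.getD p.1 []).length ≤ p.2)

theorem pvAdjacent_symm {p q : Nat × Nat} (h : pvAdjacent p q) : pvAdjacent q p := by
  unfold pvAdjacent at *; omega

theorem pvAdj_symm {m : List (List Int)} {p q : Nat × Nat} (h : pvAdj m p q) : pvAdj m q p :=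
  ⟨h.2.1, h.1, pvAdjacent_symm h.2.2⟩

theorem pvConn_symm {m : List (List Int)} {p q : Nat × Nat} (h : pvConn m p q) : pvConn m q p :=
  (Relation.ReflTransGen.symmetric (fun _ _ hh => pvAdj_symm hh)) h

theorem pvConn_nz {m : List (List Int)} {p q : Nat × Nat} (hp : pvNz m p) (h : pvConn m p q) :
    pvNz m q := by
  induction h with
  | refl => exact hp
  | tail _ hab _ => exact hab.2.1

theorem mem_pvCells {m : List (List Int)} {p : Nat × Nat} : p ∈ pvCells m ↔ pvValid m p := by
  unfold pvCells pvValid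
  cases p
  simp

theorem nodup_pvCells (m : List (List Int)) : (pvCells m).Nodup := by
  unfold pvCells
  apply List.nodup_flatMap.2
  constructor
  · intro i _
    exact (List.nodup_range).map (fun a b h => by simpa using h)
  · apply List.pairwise_iff_forall_sublist.2
    intro a b hsub
    have hab : a < b := by simpa using List.pairwise_lt_range.sublist hsub
    intro p hp hq
    simp at hp hq
    obtain ⟨j1, hj1, rfl⟩ := hp
    obtain ⟨j2, hj2, heq⟩ := hq
    simp at heq
    omega

theorem mem_pvNzCells {m : List (List Int)} {p : Nat × Nat} : p ∈ pvNzCells m ↔ pvNz m p := by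
  unfold pvNzCells
  simp only [List.mem_filter, mem_pvCells, decide_eq_true_eq]
  unfold pvNz
  exact ⟨fun h => h.2, fun h => ⟨pvNz_valid h, h⟩⟩

theorem nodup_pvNzCells (m : List (List Int)) : (pvNzCells m).Nodup :=
  (nodup_pvCells m).filter _

-- counting a set that is a filtered nodup list
theorem ncard_eq_countP {α : Type} [DecidableEq α] (l : List α) (hl : l.Nodup) (S : Set α)
    (p : α → Bool) (hS : ∀ x, x ∈ S ↔ x ∈ l ∧ p x = true) : S.ncard = l.countP p := by
  have : S = ↑(l.filter p).toFinset := by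
    ext x
    simp [hS]
  rw [this, Set.ncard_coe_finset, List.toFinset_card_of_nodup (hl.filter p)]
  exact List.countP_eq_length_filter.symm



-- Visited-state lemmas ------------------------------------------------------------------------
def pvVisP (v : List (List Bool)) (p : Nat × Nat) : Prop := pvVisGet v p.1 p.2 = true
def pvShapeOk (m : List (List Int)) (v : List (List Bool)) : Prop :=
  v.length = m.length ∧ ∀ i, (v.getD i []).length = (m.getD i []).length

theorem pvRow {α : Type} (v : List α) (i : Nat) (d : α) : v.getD i d = v[i]?.getD d :=
  List.getD_eq_getElem?_getD ..

theorem pvVisGet_eq (v : List (List Bool)) (i j : Nat) :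
    pvVisGet v i j = (v[i]?.getD [])[j]?.getD true := by
  simp [pvVisGet, List.getD_eq_getElem?_getD]

theorem pvShapeOk_init (m : List (List Int)) :
    pvShapeOk m (m.map (fun row => row.map (fun _ => false))) := by
  refine ⟨by simp, fun i => ?_⟩
  rw [pvRow, pvRow]
  by_cases hi : i < m.length
  · rw [List.getElem?_eq_getElem (by simpa using hi), List.getElem?_eq_getElem hi]
    simp
  · rw [List.getElem?_eq_none (by simpa using not_lt.1 hi),
      List.getElem?_eq_none (by simpa using not_lt.1 hi)]
    simp

theorem pvVisGet_false_bounds {v : List (List Bool)} {i j : Nat}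
    (h : pvVisGet v i j = false) : i < v.length ∧ j < (v.getD i []).length := by
  rw [pvVisGet_eq] at h
  constructor
  · by_contra hi
    rw [List.getElem?_eq_none (by omega : v.length ≤ i)] at h
    simp at h
  · by_contra hj
    rw [pvRow] at hj
    rw [List.getElem?_eq_none (by omega : (v[i]?.getD []).length ≤ j)] at h
    simp at h

theorem pvVisP_init {m : List (List Int)} {q : Nat × Nat} (hq : pvValid m q) :
    ¬ pvVisP (m.map (fun row => row.map (fun _ => false))) q := by
  obtain ⟨h1, h2⟩ := hq
  have h2' : q.2 < m[q.1].length := by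
    rw [← List.getD_eq_getElem m [] h1]
    exact h2
  unfold pvVisP
  rw [pvVisGet_eq, List.getElem?_map, List.getElem?_eq_getElem h1]
  simp only [Option.map_some, Option.getD_some]
  rw [List.getElem?_map, List.getElem?_eq_getElem h2']
  simp

theorem pvVisGet_set {v : List (List Bool)} {i j : Nat} (h : pvVisGet v i j = false)
    (a b : Nat) :
    pvVisGet (pvVisSet v i j) a b = if a = i ∧ b = j then true else pvVisGet v a b := by
  obtain ⟨hi, hj⟩ := pvVisGet_false_bounds h
  rw [pvVisGet_eq, pvVisGet_eq v]
  unfold pvVisSet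
  by_cases hai : a = i
  · rw [hai, List.getElem?_set_self hi, Option.getD_some]
    by_cases hbj : b = j
    · rw [hbj, List.getElem?_set_self (by omega), Option.getD_some, if_pos ⟨rfl, rfl⟩]
    · rw [List.getElem?_set_ne (by omega), if_neg (by tauto), pvRow]
  · rw [List.getElem?_set_ne (by omega), if_neg (by tauto)]

theorem pvShapeOk_set {m : List (List Int)} {v : List (List Bool)} {i j : Nat}
    (hs : pvShapeOk m v) : pvShapeOk m (pvVisSet v i j) := by
  obtain ⟨h1, h2⟩ := hs
  refine ⟨by simpa [pvVisSet] using h1, fun a => ?_⟩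
  rw [pvRow]
  unfold pvVisSet
  by_cases hai : a = i
  · by_cases hi : i < v.length
    · rw [hai, List.getElem?_set_self hi, Option.getD_some, List.length_set]
      exact h2 i
    · rw [List.set_eq_of_length_le (by omega), ← pvRow]
      exact h2 a
  · rw [List.getElem?_set_ne (by omega), ← pvRow]
    exact h2 a

theorem pvVisP_set_iff {v : List (List Bool)} {i j : Nat}
    (h : pvVisGet v i j = false) (q : Nat × Nat) :
    pvVisP (pvVisSet v i j) q ↔ q = (i, j) ∨ pvVisP v q := by
  unfold pvVisP
  rw [pvVisGet_set h]
  constructor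
  · intro hh
    by_cases hc : q.1 = i ∧ q.2 = j
    · exact Or.inl (Prod.ext hc.1 hc.2)
    · right; rwa [if_neg hc] at hh
  · rintro (rfl | hv)
    · simp
    · split
      · rfl
      · exact hv


-- DFS reachability ----------------------------------------------------------------------------
def pvStep (m : List (List Int)) (v : List (List Bool)) (a b : Nat × Nat) : Prop :=
  pvAdj m a b ∧ ¬ pvVisP v b
def pvSReach (m : List (List Int)) (v : List (List Bool)) (S : List (Nat × Nat)) :
    Set (Nat × Nat) :=
  {q | ∃ s ∈ S, pvNz m s ∧ ¬ pvVisP v s ∧ Relation.ReflTransGen (pvStep m v) s q}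

theorem pvSReach_nil (m : List (List Int)) (v : List (List Bool)) : pvSReach m v [] = ∅ := by
  simp [pvSReach]

theorem pvSReach_nz {m : List (List Int)} {v : List (List Bool)} {S : List (Nat × Nat)}
    {q : Nat × Nat} (h : q ∈ pvSReach m v S) : pvNz m q := by
  obtain ⟨s, _, hnz, _, hr⟩ := h
  induction hr with
  | refl => exact hnz
  | tail _ hab _ => exact hab.1.2.1

theorem pvSReach_cons_visited {m : List (List Int)} {v : List (List Bool)} {x : Nat × Nat}
    {S : List (Nat × Nat)} (hx : pvVisP v x) : pvSReach m v (x :: S) = pvSReach m v S := by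
  unfold pvSReach
  ext q
  simp only [Set.mem_setOf_eq, List.mem_cons]
  constructor
  · rintro ⟨s, (rfl | hs), hnz, hv, hr⟩
    · exact absurd hx hv
    · exact ⟨s, hs, hnz, hv, hr⟩
  · rintro ⟨s, hs, rest⟩
    exact ⟨s, Or.inr hs, rest⟩

theorem pvSReach_cons_zero {m : List (List Int)} {v : List (List Bool)} {x : Nat × Nat}
    {S : List (Nat × Nat)} (hx : ¬ pvNz m x) : pvSReach m v (x :: S) = pvSReach m v S := by
  unfold pvSReach
  ext q
  simp only [Set.mem_setOf_eq, List.mem_cons]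
  constructor
  · rintro ⟨s, (rfl | hs), hnz, hv, hr⟩
    · exact absurd hnz hx
    · exact ⟨s, hs, hnz, hv, hr⟩
  · rintro ⟨s, hs, rest⟩
    exact ⟨s, Or.inr hs, rest⟩

-- marking a non-river cell does not change reachability among river cells
theorem pvSReach_mark_zero {m : List (List Int)} {v : List (List Bool)} {x : Nat × Nat}
    (hx : ¬ pvNz m x) (hvx : pvVisGet v x.1 x.2 = false) (S : List (Nat × Nat)) :
    pvSReach m (pvVisSet v x.1 x.2) S = pvSReach m v S := by
  have key : ∀ b, pvNz m b → (pvVisP (pvVisSet v x.1 x.2) b ↔ pvVisP v b) := by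
    intro b hb
    rw [pvVisP_set_iff hvx]
    constructor
    · rintro (rfl | hh)
      · exact absurd hb (by simpa using hx)
      · exact hh
    · exact Or.inr
  unfold pvSReach
  ext q
  simp only [Set.mem_setOf_eq]
  constructor
  · rintro ⟨s, hs, hnz, hv, hr⟩
    refine ⟨s, hs, hnz, fun hh => hv ((key s hnz).2 hh), ?_⟩
    refine Relation.ReflTransGen.mono ?_ hr
    intro a b hab
    exact ⟨hab.1, fun hh => hab.2 ((key b hab.1.2.1).2 hh)⟩
  · rintro ⟨s, hs, hnz, hv, hr⟩
    refine ⟨s, hs, hnz, fun hh => hv ((key s hnz).1 hh), ?_⟩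
    refine Relation.ReflTransGen.mono ?_ hr
    intro a b hab
    exact ⟨hab.1, fun hh => hab.2 ((key b hab.1.2.1).1 hh)⟩

-- membership in get_unvisited_nodes
theorem mem_get_unvisited {i j : Nat} {m : List (List Int)} {v : List (List Bool)}
    {q : Nat × Nat} :
    q ∈ get_unvisited_nodes i j m v ↔ pvVisGet v q.1 q.2 = false ∧
      ((0 < i ∧ q = (i-1, j)) ∨ (i < m.length - 1 ∧ q = (i+1, j)) ∨
       (0 < j ∧ q = (i, j-1)) ∨ (j < (m.getD i []).length - 1 ∧ q = (i, j+1))) := by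
  unfold get_unvisited_nodes
  constructor
  · intro h
    simp only [List.mem_append] at h
    rcases h with ((h | h) | h) | h <;>
      · split at h <;> simp_all
  · rintro ⟨hv, (⟨hb, rfl⟩ | ⟨hb, rfl⟩ | ⟨hb, rfl⟩ | ⟨hb, rfl⟩)⟩ <;>
      simp only [List.mem_append]
    · exact Or.inl (Or.inl (Or.inl (by rw [if_pos ⟨hb, hv⟩]; simp)))
    · exact Or.inl (Or.inl (Or.inr (by rw [if_pos ⟨hb, hv⟩]; simp)))
    · exact Or.inl (Or.inr (by rw [if_pos ⟨hb, hv⟩]; simp))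
    · exact Or.inr (by rw [if_pos ⟨hb, hv⟩]; simp)

-- a river neighbour of a valid river cell passes get_unvisited_nodes' bound checks
theorem adj_mem_get_unvisited {m : List (List Int)} {v : List (List Bool)} {i j : Nat}
    {q : Nat × Nat} (hx : pvValid m (i, j)) (hq : pvNz m q) (hadj : pvAdjacent (i, j) q)
    (hv : ¬ pvVisP v q) : q ∈ get_unvisited_nodes i j m v := by
  have hqv := pvNz_valid hq
  rw [mem_get_unvisited]
  refine ⟨by simpa [pvVisP] using hv, ?_⟩
  obtain ⟨q1, q2⟩ := q
  unfold pvAdjacent at hadj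
  unfold pvValid at hx hqv
  simp only [Prod.mk.injEq] at *
  rcases hadj with ⟨h1, h2⟩ | ⟨h1, h2⟩ <;> subst h1 <;> omega

theorem get_unvisited_adjacent {m : List (List Int)} {v : List (List Bool)} {i j : Nat}
    {q : Nat × Nat} (h : q ∈ get_unvisited_nodes i j m v) : pvAdjacent (i, j) q := by
  rw [mem_get_unvisited] at h
  obtain ⟨q1, q2⟩ := q
  unfold pvAdjacent
  simp only [Prod.mk.injEq] at h
  omega


theorem pvSReach_not_vis {m : List (List Int)} {v : List (List Bool)} {S : List (Nat × Nat)}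
    {q : Nat × Nat} (h : q ∈ pvSReach m v S) : ¬ pvVisP v q := by
  obtain ⟨s, _, _, hsv, hr⟩ := h
  cases (Relation.ReflTransGen.cases_tail hr) with
  | inl he => exact he ▸ hsv
  | inr hh => exact hh.choose_spec.2.2

theorem pvSReach_finite (m : List (List Int)) (v : List (List Bool)) (S : List (Nat × Nat)) :
    (pvSReach m v S).Finite := by
  apply Set.Finite.subset (List.finite_toSet (pvNzCells m))
  intro q hq
  exact mem_pvNzCells.2 (pvSReach_nz hq)

-- the crux: popping an unvisited river cell x unwinds one DFS step
theorem pvUnwind {m : List (List Int)} {v : List (List Bool)} {x : Nat × Nat}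
    (hx : pvNz m x) (hvx : pvVisGet v x.1 x.2 = false) {s q : Nat × Nat}
    (hr : Relation.ReflTransGen (pvStep m v) s q) (hs : pvNz m s) (hsv : ¬ pvVisP v s) :
    q = x ∨ ∃ s', ((s' = s ∧ s ≠ x) ∨ s' ∈ get_unvisited_nodes x.1 x.2 m (pvVisSet v x.1 x.2)) ∧
      pvNz m s' ∧ ¬ pvVisP (pvVisSet v x.1 x.2) s' ∧
      Relation.ReflTransGen (pvStep m (pvVisSet v x.1 x.2)) s' q := by
  induction hr with
  | refl =>
    by_cases hsx : s = x
    · exact Or.inl hsx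
    · exact Or.inr ⟨s, Or.inl ⟨rfl, hsx⟩, hs,
        fun hh => (by rcases (pvVisP_set_iff hvx s).1 hh with h | h; exact hsx h; exact hsv h),
        Relation.ReflTransGen.refl⟩
  | tail hr' hstep ih =>
    rename_i b q
    by_cases hqx : q = x
    · exact Or.inl hqx
    · have hq' : ¬ pvVisP (pvVisSet v x.1 x.2) q := by
        intro hh
        rcases (pvVisP_set_iff hvx q).1 hh with h | h
        · exact hqx h
        · exact hstep.2 h
      rcases ih with rfl | ⟨s', hmem, hnz', hv', hr''⟩
      · refine Or.inr ⟨q, Or.inr ?_, hstep.1.2.1, hq', Relation.ReflTransGen.refl⟩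
        have hxv : pvValid m (b.1, b.2) := by
          have := pvNz_valid hx
          exact ⟨this.1, this.2⟩
        exact adj_mem_get_unvisited hxv hstep.1.2.1 (by
          have := hstep.1.2.2
          obtain ⟨b1, b2⟩ := b
          exact this) hq'
      · exact Or.inr ⟨s', hmem, hnz', hv', hr''.tail ⟨hstep.1, hq'⟩⟩

theorem pvSReach_cons_nz {m : List (List Int)} {v : List (List Bool)} {x : Nat × Nat}
    {S : List (Nat × Nat)} (hx : pvNz m x) (hvx : ¬ pvVisP v x) :
    pvSReach m v (x :: S) = insert x (pvSReach m (pvVisSet v x.1 x.2)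
      ((get_unvisited_nodes x.1 x.2 m (pvVisSet v x.1 x.2)).reverse ++ S)) := by
  have hvx' : pvVisGet v x.1 x.2 = false := by
    unfold pvVisP at hvx
    simpa using hvx
  set v' := pvVisSet v x.1 x.2 with hv'def
  ext q
  simp only [Set.mem_insert_iff]
  constructor
  · rintro ⟨s, hsmem, hnz, hsv, hr⟩
    rcases pvUnwind hx hvx' hr hnz hsv with rfl | ⟨s', hmem, hnz', hvv', hr''⟩
    · exact Or.inl rfl
    · right
      rcases hmem with ⟨rfl, hsx⟩ | hmem
    -- source was already on the stack, or a fresh neighbour of x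
      · rcases List.mem_cons.1 hsmem with rfl | hsmem
        · exact absurd rfl hsx
        · exact ⟨s', List.mem_append_right _ hsmem, hnz', hvv', hr''⟩
      · exact ⟨s', List.mem_append_left _ (List.mem_reverse.2 hmem), hnz', hvv', hr''⟩
  · rintro (rfl | ⟨s', hmem, hnz', hvv', hr⟩)
    · exact ⟨q, List.mem_cons_self .., hx, hvx, Relation.ReflTransGen.refl⟩
    · have hsv : ¬ pvVisP v s' := fun hh => hvv' ((pvVisP_set_iff hvx' s').2 (Or.inr hh))
      have hrv : Relation.ReflTransGen (pvStep m v) s' q := by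
        refine Relation.ReflTransGen.mono ?_ hr
        intro a b hab
        exact ⟨hab.1, fun hh => hab.2 ((pvVisP_set_iff hvx' b).2 (Or.inr hh))⟩
      rcases List.mem_append.1 hmem with hnb | hS
      · have hnb' := List.mem_reverse.1 hnb
        have hadj : pvAdjacent x s' := by
          have := get_unvisited_adjacent hnb'
          obtain ⟨x1, x2⟩ := x
          exact this
        exact ⟨x, List.mem_cons_self .., hx, hvx,
          Relation.ReflTransGen.head ⟨⟨hx, hnz', hadj⟩, hsv⟩ hrv⟩
      · exact ⟨s', List.mem_cons_of_mem _ hS, hnz', hsv, hrv⟩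

theorem pvNotMem_SReach_mark {m : List (List Int)} {v : List (List Bool)} {x : Nat × Nat}
    (hvx : pvVisGet v x.1 x.2 = false) (S : List (Nat × Nat)) :
    x ∉ pvSReach m (pvVisSet v x.1 x.2) S := by
  intro hh
  exact pvSReach_not_vis hh ((pvVisP_set_iff hvx x).2 (Or.inl rfl))


theorem dftLoop_spec (m : List (List Int)) (stack : List (Nat × Nat)) (v : List (List Bool))
    (size : Int) :
    (dftLoop m stack v size).1 = size + ((pvSReach m v stack).ncard : Int) ∧
    (∀ q, pvNz m q → (pvVisP (dftLoop m stack v size).2 q ↔ pvVisP v q ∨ q ∈ pvSReach m v stack)) ∧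
    (pvShapeOk m v → pvShapeOk m (dftLoop m stack v size).2) := by
  induction stack, v, size using dftLoop.induct m with
  | case1 v size =>
    simp [dftLoop, pvSReach_nil]
  | case2 i j rest v size hvis ih =>
    rw [dftLoop, if_pos hvis]
    rw [pvSReach_cons_visited (by exact hvis)]
    exact ih
  | case3 vv ss i j stack hvis v' hzero ih =>
    rw [dftLoop, if_neg hvis]
    simp only [if_pos hzero]
    have hv : pvVisGet vv i j = false := by simpa using hvis
    have hx : ¬ pvNz m (i, j) := fun h => h (eq_of_beq hzero)
    have h2 := pvSReach_mark_zero (m := m) (x := (i, j)) hx hv stack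
    dsimp only at h2
    have hre : pvSReach m vv ((i, j) :: stack) = pvSReach m (pvVisSet vv i j) stack := by
      rw [pvSReach_cons_zero hx, ← h2]
    refine ⟨?_, ?_, ?_⟩
    · rw [ih.1, hre]
    · intro q hq
      rw [ih.2.1 q hq, hre]
      have hq' : pvVisP (pvVisSet vv i j) q ↔ pvVisP vv q := by
        rw [pvVisP_set_iff hv q]
        constructor
        · rintro (rfl | h)
          · exact absurd hq hx
          · exact h
        · exact Or.inr
      rw [hq']
    · intro hs
      exact ih.2.2 (pvShapeOk_set hs)
  | case4 vv ss i j stack hvis v' hzero ih =>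
    rw [dftLoop, if_neg hvis]
    simp only [if_neg hzero]
    have hv : pvVisGet vv i j = false := by simpa using hvis
    have hx : pvNz m (i, j) := by
      intro h
      rw [show pvVal m (i, j) = pvMatGet m i j from rfl] at h
      simp [h] at hzero
    have hvx : ¬ pvVisP vv (i, j) := by simp [pvVisP, hv]
    have hkey := pvSReach_cons_nz (m := m) (v := vv) (x := (i, j)) (S := stack) hx hvx
    dsimp only at hkey
    have hnotmem := pvNotMem_SReach_mark (m := m) (x := (i, j)) hv
      ((get_unvisited_nodes i j m (pvVisSet vv i j)).reverse ++ stack)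
    dsimp only at hnotmem
    have hcard : (pvSReach m vv ((i, j) :: stack)).ncard
        = (pvSReach m (pvVisSet vv i j)
            ((get_unvisited_nodes i j m (pvVisSet vv i j)).reverse ++ stack)).ncard + 1 := by
      rw [hkey]
      exact Set.ncard_insert_of_notMem hnotmem (pvSReach_finite ..)
    refine ⟨?_, ?_, ?_⟩
    · rw [ih.1, hcard]
      push_cast
      ring
    · intro q hq
      rw [ih.2.1 q hq, hkey]
      rw [pvVisP_set_iff hv q, Set.mem_insert_iff]
      tauto
    · intro hs
      exact ih.2.2 (pvShapeOk_set hs)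


-- Nested row/column loops are one loop over the row-major cell list ---------------------------
theorem pvFoldlCells {σ : Type} (m : List (List Int)) (g : σ → Nat × Nat → σ) (init : σ) :
    (List.range m.length).foldl (fun st i =>
      (List.range (m.getD i []).length).foldl (fun st j => g st (i, j)) st) init
    = (pvCells m).foldl g init := by
  unfold pvCells
  rw [List.foldl_flatMap]
  congr 1
  funext st i
  rw [List.foldl_map]


-- Quick-find analysis -------------------------------------------------------------------------
def pvL (lab : PySem.Dict (Nat × Nat) (Nat × Nat)) (p : Nat × Nat) : Nat × Nat := lab.getD p p

def pvGJoin (G : (Nat × Nat) → (Nat × Nat) → Prop) (e : (Nat × Nat) × (Nat × Nat)) :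
    (Nat × Nat) → (Nat × Nat) → Prop :=
  fun p q => G p q ∨ (G p e.1 ∧ G e.2 q) ∨ (G p e.2 ∧ G e.1 q)

theorem pvGJoin_equiv {G : (Nat × Nat) → (Nat × Nat) → Prop} (h : Equivalence G)
    (e : (Nat × Nat) × (Nat × Nat)) : Equivalence (pvGJoin G e) := by
  constructor
  · intro x
    exact Or.inl (h.refl x)
  · rintro x y (hxy | ⟨h1, h2⟩ | ⟨h1, h2⟩)
    · exact Or.inl (h.symm hxy)
    · exact Or.inr (Or.inr ⟨h.symm h2, h.symm h1⟩)
    · exact Or.inr (Or.inl ⟨h.symm h2, h.symm h1⟩)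
  · rintro x y z (hxy | ⟨h1, h2⟩ | ⟨h1, h2⟩) (hyz | ⟨g1, g2⟩ | ⟨g1, g2⟩)
    · exact Or.inl (h.trans hxy hyz)
    · exact Or.inr (Or.inl ⟨h.trans hxy g1, g2⟩)
    · exact Or.inr (Or.inr ⟨h.trans hxy g1, g2⟩)
    · exact Or.inr (Or.inl ⟨h1, h.trans h2 hyz⟩)
    · exact Or.inr (Or.inl ⟨h1, g2⟩)
    · exact Or.inl (h.trans h1 g2)
    · exact Or.inr (Or.inr ⟨h1, h.trans h2 hyz⟩)
    · exact Or.inl (h.trans h1 g2)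
    · exact Or.inr (Or.inr ⟨h1, g2⟩)

def pvGrelFrom (E : List ((Nat × Nat) × (Nat × Nat))) (G : (Nat × Nat) → (Nat × Nat) → Prop) :
    (Nat × Nat) → (Nat × Nat) → Prop := E.foldl pvGJoin G

theorem pvGrelFrom_equiv (E : List ((Nat × Nat) × (Nat × Nat)))
    {G : (Nat × Nat) → (Nat × Nat) → Prop} (h : Equivalence G) : Equivalence (pvGrelFrom E G) := by
  induction E generalizing G with
  | nil => exact h
  | cons e E ih => exact ih (pvGJoin_equiv h e)

theorem pvGrelFrom_mono (E : List ((Nat × Nat) × (Nat × Nat)))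
    {G : (Nat × Nat) → (Nat × Nat) → Prop} {p q : Nat × Nat} (h : G p q) :
    pvGrelFrom E G p q := by
  induction E generalizing G with
  | nil => exact h
  | cons e E ih => exact ih (Or.inl h)

theorem pvGrelFrom_edge (E : List ((Nat × Nat) × (Nat × Nat)))
    {G : (Nat × Nat) → (Nat × Nat) → Prop} (h : Equivalence G)
    {e : (Nat × Nat) × (Nat × Nat)} (he : e ∈ E) : pvGrelFrom E G e.1 e.2 := by
  induction E generalizing G with
  | nil => simp at he
  | cons e' E ih =>
    rcases List.mem_cons.1 he with rfl | he
    · exact pvGrelFrom_mono E (Or.inr (Or.inl ⟨h.refl _, h.refl _⟩))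
    · exact ih (pvGJoin_equiv h e') he

theorem pvGrelFrom_le_conn (m : List (List Int)) (E : List ((Nat × Nat) × (Nat × Nat)))
    {G : (Nat × Nat) → (Nat × Nat) → Prop}
    (hE : ∀ e ∈ E, pvAdj m e.1 e.2) (hG : ∀ p q, G p q → pvConn m p q) :
    ∀ p q, pvGrelFrom E G p q → pvConn m p q := by
  induction E generalizing G with
  | nil => exact hG
  | cons e E ih =>
    refine ih (fun e' he' => hE e' (List.mem_cons_of_mem _ he')) ?_
    rintro p q (hpq | ⟨h1, h2⟩ | ⟨h1, h2⟩)
    · exact hG p q hpq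
    · exact ((hG p e.1 h1).tail (hE e (List.mem_cons_self ..))).trans (hG e.2 q h2)
    · exact ((hG p e.2 h1).tail (pvAdj_symm (hE e (List.mem_cons_self ..)))).trans (hG e.1 q h2)


-- the dict layer: pvMerge keeps keys and relabels the class of b -------------------------------
theorem pvMerge_keys (lab : PySem.Dict (Nat × Nat) (Nat × Nat)) (a b : Nat × Nat) :
    (pvMerge lab a b).keys = lab.keys := by
  unfold pvMerge
  dsimp only
  split
  · show (lab.items.map _).map Prod.fst = lab.items.map Prod.fst
    rw [List.map_map]
    apply List.map_congr_left
    intro p _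
    by_cases h : p.2 = lab.getD b b <;> simp [h]
  · rfl

theorem pvMem_items_of_mem_keys {lab : PySem.Dict (Nat × Nat) (Nat × Nat)} {p : Nat × Nat}
    (hnd : lab.keys.Nodup) (hp : p ∈ lab.keys) : (p, pvL lab p) ∈ lab.items := by
  have hx : ∃ pair ∈ lab.items, pair.1 = p := by
    simpa [PySem.Dict.keys] using hp
  obtain ⟨⟨k, val⟩, hmem, hfst⟩ := hx
  cases hfst
  have hgd : lab.getD k k = val := PySem.Dict.getD_of_mem_items lab hmem hnd k
  unfold pvL
  rw [hgd]
  exact hmem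

theorem pvL_merge {lab : PySem.Dict (Nat × Nat) (Nat × Nat)} {p : Nat × Nat} (a b : Nat × Nat)
    (hnd : lab.keys.Nodup) (hp : p ∈ lab.keys) :
    pvL (pvMerge lab a b) p =
      if pvL lab a = pvL lab b then pvL lab p
      else (if pvL lab p = pvL lab b then pvL lab a else pvL lab p) := by
  by_cases hab : pvL lab a = pvL lab b
  · rw [if_pos hab]
    unfold pvMerge
    dsimp only
    rw [if_neg (by simpa [pvL] using not_not.2 hab)]
  · rw [if_neg hab]
    have hmem := pvMem_items_of_mem_keys hnd hp
    have hnd' : (pvMerge lab a b).keys.Nodup := by rw [pvMerge_keys]; exact hnd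
    have hitems : (pvMerge lab a b).items
        = lab.items.map (fun r => if r.2 = lab.getD b b then (r.1, lab.getD a a) else r) := by
      unfold pvMerge
      dsimp only
      rw [if_pos (by simpa [pvL] using hab)]
    by_cases hpb : pvL lab p = pvL lab b
    · rw [if_pos hpb]
      have : (p, lab.getD a a) ∈ (pvMerge lab a b).items := by
        rw [hitems]
        refine List.mem_map.2 ⟨(p, pvL lab p), hmem, ?_⟩
        rw [if_pos (by simpa [pvL] using hpb)]
      exact PySem.Dict.getD_of_mem_items _ this hnd' p
    · rw [if_neg hpb]
      have : (p, pvL lab p) ∈ (pvMerge lab a b).items := by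
        rw [hitems]
        refine List.mem_map.2 ⟨(p, pvL lab p), hmem, ?_⟩
        rw [if_neg (by simpa [pvL] using hpb)]
      exact PySem.Dict.getD_of_mem_items _ this hnd' p

-- the merge invariant: labels decide exactly the equivalence generated by the processed edges
def pvLabInv (m : List (List Int)) (lab : PySem.Dict (Nat × Nat) (Nat × Nat))
    (G : (Nat × Nat) → (Nat × Nat) → Prop) : Prop :=
  lab.keys = pvNzCells m ∧
  ∀ p ∈ pvNzCells m, ∀ q ∈ pvNzCells m, (pvL lab p = pvL lab q ↔ G p q)

theorem pvMerge_inv {m : List (List Int)} {lab : PySem.Dict (Nat × Nat) (Nat × Nat)}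
    {G : (Nat × Nat) → (Nat × Nat) → Prop} (hG : Equivalence G) (hinv : pvLabInv m lab G)
    {a b : Nat × Nat} (ha : a ∈ pvNzCells m) (hb : b ∈ pvNzCells m) :
    pvLabInv m (pvMerge lab a b) (pvGJoin G (a, b)) := by
  obtain ⟨hkeys, hiff⟩ := hinv
  have hnd : lab.keys.Nodup := hkeys ▸ nodup_pvNzCells m
  refine ⟨by rw [pvMerge_keys]; exact hkeys, ?_⟩
  intro p hp q hq
  rw [pvL_merge a b hnd (hkeys ▸ hp), pvL_merge a b hnd (hkeys ▸ hq)]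
  unfold pvGJoin
  simp only []
  by_cases hab : pvL lab a = pvL lab b
  · rw [if_pos hab, if_pos hab, hiff p hp q hq]
    have hGab : G a b := (hiff a ha b hb).1 hab
    constructor
    · exact Or.inl
    · rintro (h | ⟨h1, h2⟩ | ⟨h1, h2⟩)
      · exact h
      · exact hG.trans h1 (hG.trans hGab h2)
      · exact hG.trans h1 (hG.trans (hG.symm hGab) h2)
  · rw [if_neg hab, if_neg hab]
    have hnab : ¬ G a b := fun h => hab ((hiff a ha b hb).2 h)
    by_cases h1 : pvL lab p = pvL lab b <;> by_cases h2 : pvL lab q = pvL lab b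
    · rw [if_pos h1, if_pos h2]
      have : G p q := (hiff p hp q hq).1 (h1.trans h2.symm)
      simp [this]
    · rw [if_pos h1, if_neg h2]
      have hpb : G p b := (hiff p hp b hb).1 h1
      constructor
      · intro he
        have hqa : G q a := (hiff q hq a ha).1 he.symm
        exact Or.inr (Or.inr ⟨hpb, hG.symm hqa⟩)
      · rintro (h | ⟨g1, g2⟩ | ⟨g1, g2⟩)
        · exact absurd (((hiff p hp q hq).2 h).symm.trans h1) h2
        · exact absurd (((hiff p hp a ha).2 g1).symm.trans h1) hab
        · exact (hiff a ha q hq).2 g2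
    · rw [if_neg h1, if_pos h2]
      have hqb : G q b := (hiff q hq b hb).1 h2
      constructor
      · intro he
        have hpa : G p a := (hiff p hp a ha).1 he
        exact Or.inr (Or.inl ⟨hpa, hG.symm hqb⟩)
      · rintro (h | ⟨g1, g2⟩ | ⟨g1, g2⟩)
        · exact absurd (((hiff p hp q hq).2 h).trans h2) h1
        · exact (hiff p hp a ha).2 g1
        · exact absurd ((hiff p hp b hb).2 g1) h1
    · rw [if_neg h1, if_neg h2]
      rw [hiff p hp q hq]
      constructor
      · exact Or.inl
      · rintro (h | ⟨g1, g2⟩ | ⟨g1, g2⟩)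
        · exact h
        · exact absurd ((hiff b hb q hq).2 g2).symm h2
        · exact absurd ((hiff p hp b hb).2 g1) h1


-- the edge list scanned by B's union phase ----------------------------------------------------
def pvMergeStep (l : PySem.Dict (Nat × Nat) (Nat × Nat)) (e : (Nat × Nat) × (Nat × Nat)) :
    PySem.Dict (Nat × Nat) (Nat × Nat) := pvMerge l e.1 e.2

def pvCellEdges (m : List (List Int)) (p : Nat × Nat) : List ((Nat × Nat) × (Nat × Nat)) :=
  if pvVal m p = 0 then []
  else
    (if p.2 + 1 < (m.getD p.1 []).length ∧ pvMatGet m p.1 (p.2 + 1) ≠ 0 then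
      [(p, (p.1, p.2 + 1))] else []) ++
    (if p.1 + 1 < m.length ∧ p.2 < (m.getD (p.1 + 1) []).length ∧ pvMatGet m (p.1 + 1) p.2 ≠ 0 then
      [(p, (p.1 + 1, p.2))] else [])

def pvEdges (m : List (List Int)) : List ((Nat × Nat) × (Nat × Nat)) :=
  (pvCells m).flatMap (pvCellEdges m)

def pvLab0 (m : List (List Int)) : PySem.Dict (Nat × Nat) (Nat × Nat) :=
  (pvCells m).foldl (fun lab p => if pvVal m p ≠ 0 then lab.insert p p else lab) PySem.Dict.empty

def pvLabF (m : List (List Int)) : PySem.Dict (Nat × Nat) (Nat × Nat) :=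
  (pvEdges m).foldl pvMergeStep (pvLab0 m)

theorem pvLab0_items (m : List (List Int)) :
    (pvLab0 m).items = (pvNzCells m).map (fun p => (p, p)) := by
  unfold pvLab0
  rw [PySem.List.foldl_ite_eq_foldl_filter]
  rw [PySem.Dict.items_foldl_insert_fresh _ (fun p => p) (fun p => p) _
    (fun a _ => PySem.Dict.contains_empty a) (by simpa using (nodup_pvCells m).filter _)]
  show [] ++ _ = _
  rw [List.nil_append]
  unfold pvNzCells
  rfl

theorem pvLab0_keys (m : List (List Int)) : (pvLab0 m).keys = pvNzCells m := by
  show (pvLab0 m).items.map Prod.fst = _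
  rw [pvLab0_items, List.map_map]
  have he : Prod.fst ∘ (fun p : Nat × Nat => (p, p)) = id := rfl
  rw [he, List.map_id]

theorem pvLab0_inv (m : List (List Int)) : pvLabInv m (pvLab0 m) Eq := by
  refine ⟨pvLab0_keys m, ?_⟩
  have hid : ∀ p ∈ pvNzCells m, pvL (pvLab0 m) p = p := by
    intro p hp
    unfold pvL
    exact PySem.Dict.getD_of_mem_items _ (by rw [pvLab0_items]; exact List.mem_map_of_mem hp)
      (by rw [pvLab0_keys]; exact nodup_pvNzCells m) p
  intro p hp q hq
  rw [hid p hp, hid q hq]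

theorem pvEdges_mem {m : List (List Int)} {e : (Nat × Nat) × (Nat × Nat)} (he : e ∈ pvEdges m) :
    e.1 ∈ pvNzCells m ∧ e.2 ∈ pvNzCells m ∧ pvAdj m e.1 e.2 := by
  obtain ⟨p, hp, hc⟩ := List.mem_flatMap.1 he
  unfold pvCellEdges at hc
  split at hc
  · simp at hc
  · rename_i hval
    have hpnz : pvNz m p := hval
    rcases List.mem_append.1 hc with hc | hc <;> split at hc <;> simp at hc <;> subst hc
    · rename_i hcond
      have hqnz : pvNz m (p.1, p.2 + 1) := hcond.2
      exact ⟨mem_pvNzCells.2 hpnz, mem_pvNzCells.2 hqnz,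
        hpnz, hqnz, Or.inl ⟨rfl, Or.inl rfl⟩⟩
    · rename_i hcond
      have hqnz : pvNz m (p.1 + 1, p.2) := hcond.2.2
      exact ⟨mem_pvNzCells.2 hpnz, mem_pvNzCells.2 hqnz,
        hpnz, hqnz, Or.inr ⟨rfl, Or.inl rfl⟩⟩

theorem pvAdj_mem_edges {m : List (List Int)} {a b : Nat × Nat} (h : pvAdj m a b) :
    (a, b) ∈ pvEdges m ∨ (b, a) ∈ pvEdges m := by
  obtain ⟨ha, hb, hadj⟩ := h
  have hav := pvNz_valid ha
  have hbv := pvNz_valid hb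
  obtain ⟨a1, a2⟩ := a
  obtain ⟨b1, b2⟩ := b
  unfold pvValid at hav hbv
  simp only at hav hbv
  rcases hadj with ⟨h1, h2 | h2⟩ | ⟨h1, h2 | h2⟩ <;> simp only at h1 h2
  · -- b is the right neighbour of a
    rw [← h1, ← h2] at hb hbv
    left
    refine List.mem_flatMap.2 ⟨(a1, a2), mem_pvCells.2 hav, ?_⟩
    unfold pvCellEdges
    rw [if_neg ha]
    apply List.mem_append_left
    rw [if_pos ⟨hbv.2, hb⟩]
    simp
    omega
  · -- a is the right neighbour of b
    rw [h1, ← h2] at ha hav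
    right
    refine List.mem_flatMap.2 ⟨(b1, b2), mem_pvCells.2 hbv, ?_⟩
    unfold pvCellEdges
    rw [if_neg hb]
    apply List.mem_append_left
    rw [if_pos ⟨hav.2, ha⟩]
    simp
    omega
  · -- b is the down neighbour of a
    rw [← h1, ← h2] at hb hbv
    left
    refine List.mem_flatMap.2 ⟨(a1, a2), mem_pvCells.2 hav, ?_⟩
    unfold pvCellEdges
    rw [if_neg ha]
    apply List.mem_append_right
    rw [if_pos ⟨hbv.1, hbv.2, hb⟩]
    simp
    omega
  · -- a is the down neighbour of b
    rw [h1, ← h2] at ha hav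
    right
    refine List.mem_flatMap.2 ⟨(b1, b2), mem_pvCells.2 hbv, ?_⟩
    unfold pvCellEdges
    rw [if_neg hb]
    apply List.mem_append_right
    rw [if_pos ⟨hav.1, hav.2, ha⟩]
    simp
    omega


theorem pvFold_inv (m : List (List Int)) (E : List ((Nat × Nat) × (Nat × Nat))) :
    ∀ (lab : PySem.Dict (Nat × Nat) (Nat × Nat)) (G : (Nat × Nat) → (Nat × Nat) → Prop),
    Equivalence G → pvLabInv m lab G →
    (∀ e ∈ E, e.1 ∈ pvNzCells m ∧ e.2 ∈ pvNzCells m) →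
    pvLabInv m (E.foldl pvMergeStep lab) (pvGrelFrom E G) := by
  induction E with
  | nil => exact fun lab G _ hinv _ => hinv
  | cons e E ih =>
    intro lab G hG hinv hE
    exact ih _ _ (pvGJoin_equiv hG e)
      (pvMerge_inv hG hinv (hE e (List.mem_cons_self ..)).1 (hE e (List.mem_cons_self ..)).2)
      (fun e' he' => hE e' (List.mem_cons_of_mem _ he'))

theorem pvLabF_inv (m : List (List Int)) :
    pvLabInv m (pvLabF m) (pvGrelFrom (pvEdges m) Eq) :=
  pvFold_inv m (pvEdges m) (pvLab0 m) Eq eq_equivalence (pvLab0_inv m)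
    (fun _ he => ⟨(pvEdges_mem he).1, (pvEdges_mem he).2.1⟩)

theorem pvGrel_iff_conn (m : List (List Int)) {p q : Nat × Nat} :
    pvGrelFrom (pvEdges m) Eq p q ↔ pvConn m p q := by
  have hequiv : Equivalence (pvGrelFrom (pvEdges m) Eq) := pvGrelFrom_equiv _ eq_equivalence
  constructor
  · exact pvGrelFrom_le_conn m (pvEdges m) (fun _ he => (pvEdges_mem he).2.2)
      (fun p q h => by cases h; exact Relation.ReflTransGen.refl) p q
  · intro h
    induction h with
    | refl => exact hequiv.refl p
    | tail h1 hadj ih =>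
      rcases pvAdj_mem_edges hadj with he | he
      · exact hequiv.trans ih (pvGrelFrom_edge _ eq_equivalence he)
      · exact hequiv.trans ih (hequiv.symm (pvGrelFrom_edge _ eq_equivalence he))

theorem pvLabF_keys (m : List (List Int)) : (pvLabF m).keys = pvNzCells m := (pvLabF_inv m).1

theorem pvLabF_char (m : List (List Int)) {p q : Nat × Nat} (hp : p ∈ pvNzCells m)
    (hq : q ∈ pvNzCells m) : pvL (pvLabF m) p = pvL (pvLabF m) q ↔ pvConn m p q :=
  ((pvLabF_inv m).2 p hp q hq).trans (pvGrel_iff_conn m)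

-- B's union phase, cell by cell --------------------------------------------------------------
def pvCellBody (m : List (List Int)) (lab : PySem.Dict (Nat × Nat) (Nat × Nat)) (p : Nat × Nat) :
    PySem.Dict (Nat × Nat) (Nat × Nat) :=
  if pvMatGet m p.1 p.2 == 0 then lab
  else
    let lab' := if p.2 + 1 < (m.getD p.1 []).length ∧ pvMatGet m p.1 (p.2 + 1) ≠ 0 then
        pvMerge lab p (p.1, p.2 + 1) else lab
    if p.1 + 1 < m.length ∧ p.2 < (m.getD (p.1 + 1) []).length ∧ pvMatGet m (p.1 + 1) p.2 ≠ 0 then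
      pvMerge lab' p (p.1 + 1, p.2) else lab'

theorem pvCellBody_eq (m : List (List Int)) (lab : PySem.Dict (Nat × Nat) (Nat × Nat))
    (p : Nat × Nat) : pvCellBody m lab p = (pvCellEdges m p).foldl pvMergeStep lab := by
  unfold pvCellBody pvCellEdges
  by_cases h0 : pvVal m p = 0
  · rw [if_pos h0, if_pos (by simpa [pvVal] using beq_iff_eq.2 h0)]
    rfl
  · rw [if_neg h0, if_neg (by simpa [pvVal] using (by simpa using h0 : ¬ (pvMatGet m p.1 p.2 = 0)))]
    dsimp only
    by_cases h1 : p.2 + 1 < (m.getD p.1 []).length ∧ pvMatGet m p.1 (p.2 + 1) ≠ 0 <;>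
      by_cases h2 : p.1 + 1 < m.length ∧ p.2 < (m.getD (p.1 + 1) []).length ∧
        pvMatGet m (p.1 + 1) p.2 ≠ 0
    · rw [if_pos h1, if_pos h2, if_pos h1, if_pos h2]
      rfl
    · rw [if_pos h1, if_neg h2, if_pos h1, if_neg h2]
      rfl
    · rw [if_neg h1, if_pos h2, if_neg h1, if_pos h2]
      rfl
    · rw [if_neg h1, if_neg h2, if_neg h1, if_neg h2]
      rfl

theorem pvUnionFold_eq (m : List (List Int)) (lab0' : PySem.Dict (Nat × Nat) (Nat × Nat)) :
    (pvCells m).foldl (pvCellBody m) lab0' = (pvEdges m).foldl pvMergeStep lab0' := by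
  refine Eq.trans (PySem.List.foldl_congr_mem (pvCells m) (pvCellBody m)
    (fun lab p => (pvCellEdges m p).foldl pvMergeStep lab) lab0'
    (fun acc x _ => pvCellBody_eq m acc x)) ?_
  unfold pvEdges
  rw [List.foldl_flatMap]

-- B's emission phase --------------------------------------------------------------------------
def pvEmit (m : List (List Int)) (lab : PySem.Dict (Nat × Nat) (Nat × Nat))
    (st : List Int × PySem.Set (Nat × Nat)) (p : Nat × Nat) : List Int × PySem.Set (Nat × Nat) :=
  if pvMatGet m p.1 p.2 == 0 then st
  else
    let r := lab.getD p p
    if PySem.Set.contains st.2 r then st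
    else (st.1 ++ [((lab.keys.countP (fun c => lab.getD c c = r)) : Int)], PySem.Set.add st.2 r)

theorem pvAlt_eq (m : List (List Int)) :
    get_river_sizes_alt m
      = ((pvCells m).foldl (pvEmit m (pvLabF m))
          (([] : List Int), (PySem.Set.empty : PySem.Set (Nat × Nat)))).1 := by
  have e1 : (List.range m.length).foldl (fun lab i =>
      (List.range (m.getD i []).length).foldl (fun lab j =>
        if pvMatGet m i j ≠ 0 then lab.insert (i, j) (i, j) else lab) lab)
      (PySem.Dict.empty : PySem.Dict (Nat × Nat) (Nat × Nat)) = pvLab0 m :=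
    pvFoldlCells m (fun lab p => if pvVal m p ≠ 0 then lab.insert p p else lab) PySem.Dict.empty
  have e2 : (List.range m.length).foldl (fun lab i =>
      (List.range (m.getD i []).length).foldl (fun lab j =>
        if pvMatGet m i j == 0 then lab
        else if i + 1 < m.length ∧ j < (m.getD (i + 1) []).length ∧ pvMatGet m (i + 1) j ≠ 0 then
          pvMerge (if j + 1 < (m.getD i []).length ∧ pvMatGet m i (j + 1) ≠ 0 then
            pvMerge lab (i, j) (i, j + 1) else lab) (i, j) (i + 1, j)
        else (if j + 1 < (m.getD i []).length ∧ pvMatGet m i (j + 1) ≠ 0 then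
          pvMerge lab (i, j) (i, j + 1) else lab)) lab) (pvLab0 m) = pvLabF m :=
    (pvFoldlCells m (pvCellBody m) (pvLab0 m)).trans (pvUnionFold_eq m (pvLab0 m))
  unfold get_river_sizes_alt
  dsimp only
  rw [e1, e2]
  exact congrArg Prod.fst (pvFoldlCells m (pvEmit m (pvLabF m)) _)


-- A's outer loop ------------------------------------------------------------------------------
theorem pvSReach_singleton {m : List (List Int)} {v : List (List Bool)} {c : Nat × Nat}
    (hc : pvNz m c) (hvc : ¬ pvVisP v c)
    (hblock : ∀ q, pvNz m q → pvVisP v q → ¬ pvConn m c q) :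
    pvSReach m v [c] = {q | pvConn m c q} := by
  ext q
  simp only [Set.mem_setOf_eq]
  constructor
  · rintro ⟨s, hs, hnz, hsv, hr⟩
    rcases List.mem_singleton.1 hs with rfl
    refine Relation.ReflTransGen.mono ?_ hr
    exact fun a b hab => hab.1
  · intro hconn
    have key : ∀ q, pvConn m c q → Relation.ReflTransGen (pvStep m v) c q ∧ ¬ pvVisP v q := by
      intro q hq
      induction hq with
      | refl => exact ⟨Relation.ReflTransGen.refl, hvc⟩
      | tail h1 hadj ih =>
        rename_i b q'
        have hnv : ¬ pvVisP v q' := by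
          intro hvq
          exact hblock q' hadj.2.1 hvq (h1.tail hadj)
        exact ⟨ih.1.tail ⟨hadj, hnv⟩, hnv⟩
    exact ⟨c, List.mem_singleton.2 rfl, hc, hvc, (key q hconn).1⟩

def pvMainBody (m : List (List Int)) (st : List (List Bool) × List Int) (p : Nat × Nat) :
    List (List Bool) × List Int :=
  if pvVisGet st.1 p.1 p.2 then st
  else if pvMatGet m p.1 p.2 == 0 then st
  else
    let r := depth_first_transverse p.1 p.2 m st.1
    if r.1 > 0 then (r.2, st.2 ++ [r.1]) else (r.2, st.2)

theorem pvA_eq (m : List (List Int)) :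
    get_river_sizes m = ((pvCells m).foldl (pvMainBody m)
      (m.map (fun row => row.map (fun _ => false)), ([] : List Int))).2 := by
  unfold get_river_sizes
  dsimp only
  exact congrArg Prod.snd (pvFoldlCells m (pvMainBody m) _)

theorem pvMain (m : List (List Int)) :
    ∀ (suffix done : List (Nat × Nat)) (v : List (List Bool)) (sizes : List Int)
      (seen : PySem.Set (Nat × Nat)),
    pvCells m = done ++ suffix →
    pvShapeOk m v →
    (∀ q, pvNz m q → (pvVisP v q ↔ ∃ p ∈ done, pvNz m p ∧ pvConn m p q)) →
    (∀ r, r ∈ seen ↔ ∃ p ∈ done, pvNz m p ∧ pvL (pvLabF m) p = r) →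
    (suffix.foldl (pvMainBody m) (v, sizes)).2
      = (suffix.foldl (pvEmit m (pvLabF m)) (sizes, seen)).1 := by
  intro suffix
  induction suffix with
  | nil => intro done v sizes seen _ _ _ _; rfl
  | cons c suffix ih =>
    intro done v sizes seen hsplit hshape hvis hseen
    have hcmem : c ∈ pvCells m := by rw [hsplit]; simp
    have hcvalid : pvValid m c := mem_pvCells.1 hcmem
    have hsplit' : pvCells m = (done ++ [c]) ++ suffix := by rw [hsplit]; simp
    rw [List.foldl_cons, List.foldl_cons]
    by_cases hnzc : pvNz m c
    · by_cases hvisc : pvVisP v c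
      · -- already visited river cell: both sides skip
        have hA : pvMainBody m (v, sizes) c = (v, sizes) := by
          unfold pvMainBody
          rw [if_pos (by exact hvisc)]
        have hcontains : seen.contains ((pvLabF m).getD c c) = true := by
          obtain ⟨p, hp, hpnz, hpconn⟩ := (hvis c hnzc).1 hvisc
          have hl : pvL (pvLabF m) p = pvL (pvLabF m) c :=
            (pvLabF_char m (mem_pvNzCells.2 hpnz) (mem_pvNzCells.2 hnzc)).2 hpconn
          have hmem : (pvLabF m).getD c c ∈ seen := (hseen _).2 ⟨p, hp, hpnz, hl⟩
          simpa [PySem.Set.contains] using hmem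
        have hB : pvEmit m (pvLabF m) (sizes, seen) c = (sizes, seen) := by
          unfold pvEmit
          rw [if_neg (by simpa [pvVal] using hnzc)]
          dsimp only
          rw [if_pos hcontains]

        rw [hA, hB]
        refine ih (done ++ [c]) v sizes seen hsplit' hshape ?_ ?_
        · intro q hq
          rw [hvis q hq]
          constructor
          · rintro ⟨p, hp, hnz, hcn⟩
            exact ⟨p, by simp [hp], hnz, hcn⟩
          · rintro ⟨p, hp, hnz, hcn⟩
            rcases List.mem_append.1 hp with hp' | hpc
            · exact ⟨p, hp', hnz, hcn⟩
            · obtain rfl := List.mem_singleton.1 hpc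
              obtain ⟨p0, hp0, hp0nz, hp0conn⟩ := (hvis p hnzc).1 hvisc
              exact ⟨p0, hp0, hp0nz, hp0conn.trans hcn⟩
        · intro r
          rw [hseen r]
          constructor
          · rintro ⟨p, hp, hnz, hl⟩
            exact ⟨p, by simp [hp], hnz, hl⟩
          · rintro ⟨p, hp, hnz, hl⟩
            rcases List.mem_append.1 hp with hp' | hpc
            · exact ⟨p, hp', hnz, hl⟩
            · obtain rfl := List.mem_singleton.1 hpc
              obtain ⟨p0, hp0, hp0nz, hp0conn⟩ := (hvis p hnzc).1 hvisc
              refine ⟨p0, hp0, hp0nz, ?_⟩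
              rw [← hl]
              exact (pvLabF_char m (mem_pvNzCells.2 hp0nz) (mem_pvNzCells.2 hnzc)).2 hp0conn
      · -- fresh river cell: A flood-fills it, B emits its quick-find class size
        have hblock : ∀ q, pvNz m q → pvVisP v q → ¬ pvConn m c q := by
          intro q hq hvq hconn
          obtain ⟨p, hp, hpnz, hpconn⟩ := (hvis q hq).1 hvq
          exact hvisc ((hvis c hnzc).2 ⟨p, hp, hpnz, hpconn.trans (pvConn_symm hconn)⟩)
        have hcomp : pvSReach m v [c] = {q | pvConn m c q} :=
          pvSReach_singleton hnzc hvisc hblock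
        have hspec := dftLoop_spec m [(c.1, c.2)] v 0
        have hfin : ({q | pvConn m c q} : Set (Nat × Nat)).Finite := by
          rw [← hcomp]; exact pvSReach_finite ..
        have hcount : ({q | pvConn m c q} : Set (Nat × Nat)).ncard
            = (pvLabF m).keys.countP
                (fun c_1 => decide ((pvLabF m).getD c_1 c_1 = (pvLabF m).getD c c)) := by
          rw [pvLabF_keys]
          refine ncard_eq_countP (pvNzCells m) (nodup_pvNzCells m) _ _ ?_
          intro x
          simp only [Set.mem_setOf_eq, decide_eq_true_eq]
          constructor
          · intro hconn
            have hxnz : pvNz m x := pvConn_nz hnzc hconn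
            exact ⟨mem_pvNzCells.2 hxnz,
              (pvLabF_char m (mem_pvNzCells.2 hxnz) (mem_pvNzCells.2 hnzc)).2 (pvConn_symm hconn)⟩
          · rintro ⟨hx, hl⟩
            exact pvConn_symm ((pvLabF_char m hx (mem_pvNzCells.2 hnzc)).1 hl)
        have hpos : 0 < ({q | pvConn m c q} : Set (Nat × Nat)).ncard :=
          Set.Nonempty.ncard_pos hfin ⟨c, Relation.ReflTransGen.refl⟩
        have hstack : pvSReach m v [(c.1, c.2)] = pvSReach m v [c] := by
          congr
        have hsz : (depth_first_transverse c.1 c.2 m v).1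
            = (({q | pvConn m c q} : Set (Nat × Nat)).ncard : Int) := by
          unfold depth_first_transverse
          rw [hspec.1, hstack, hcomp]
          ring
        have hA : pvMainBody m (v, sizes) c
            = ((depth_first_transverse c.1 c.2 m v).2,
               sizes ++ [(({q | pvConn m c q} : Set (Nat × Nat)).ncard : Int)]) := by
          unfold pvMainBody
          rw [if_neg (by simpa [pvVisP] using hvisc), if_neg (by simpa [pvVal] using hnzc)]
          dsimp only
          rw [if_pos (by rw [hsz]; exact_mod_cast hpos), hsz]
        have hncontains : ¬ seen.contains ((pvLabF m).getD c c) = true := by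
          intro hmem
          obtain ⟨p, hp, hpnz, hl⟩ := (hseen (pvL (pvLabF m) c)).1
            (by simpa [PySem.Set.contains] using hmem)
          have hconn : pvConn m p c :=
            (pvLabF_char m (mem_pvNzCells.2 hpnz) (mem_pvNzCells.2 hnzc)).1 hl
          exact hvisc ((hvis c hnzc).2 ⟨p, hp, hpnz, hconn⟩)
        have hB : pvEmit m (pvLabF m) (sizes, seen) c
            = (sizes ++ [(({q | pvConn m c q} : Set (Nat × Nat)).ncard : Int)],
               PySem.Set.add seen (pvL (pvLabF m) c)) := by
          unfold pvEmit
          rw [if_neg (by simpa [pvVal] using hnzc)]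
          dsimp only
          rw [if_neg hncontains, hcount]
          rfl
        rw [hA, hB]
        refine ih (done ++ [c]) _ _ _ hsplit' (hspec.2.2 hshape) ?_ ?_
        · intro q hq
          unfold depth_first_transverse
          rw [hspec.2.1 q hq, hstack, hcomp, hvis q hq]
          simp only [Set.mem_setOf_eq, List.mem_append, List.mem_singleton]
          constructor
          · rintro (⟨p, hp, hnz, hcn⟩ | hcn)
            · exact ⟨p, Or.inl hp, hnz, hcn⟩
            · exact ⟨c, Or.inr rfl, hnzc, hcn⟩
          · rintro ⟨p, hp | rfl, hnz, hcn⟩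
            · exact Or.inl ⟨p, hp, hnz, hcn⟩
            · exact Or.inr hcn
        · intro r
          rw [PySem.Set.mem_add, hseen r]
          simp only [List.mem_append, List.mem_singleton]
          constructor
          · rintro (⟨p, hp, hnz, hl⟩ | rfl)
            · exact ⟨p, Or.inl hp, hnz, hl⟩
            · exact ⟨c, Or.inr rfl, hnzc, rfl⟩
          · rintro ⟨p, hp | rfl, hnz, hl⟩
            · exact Or.inl ⟨p, hp, hnz, hl⟩
            · exact Or.inr hl.symm
    · -- not a river cell: both sides skip
      have hA : pvMainBody m (v, sizes) c = (v, sizes) := by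
        unfold pvMainBody
        by_cases hvisc : pvVisGet v c.1 c.2
        · rw [if_pos hvisc]
        · rw [if_neg hvisc, if_pos (by simpa [pvNz, pvVal] using hnzc)]
      have hB : pvEmit m (pvLabF m) (sizes, seen) c = (sizes, seen) := by
        unfold pvEmit
        rw [if_pos (by simpa [pvNz, pvVal] using hnzc)]
      rw [hA, hB]
      refine ih (done ++ [c]) v sizes seen hsplit' hshape ?_ ?_
      · intro q hq
        rw [hvis q hq]
        constructor
        · rintro ⟨p, hp, hnz, hcn⟩
          exact ⟨p, by simp [hp], hnz, hcn⟩
        · rintro ⟨p, hp, hnz, hcn⟩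
          rcases List.mem_append.1 hp with hp' | hpc
          · exact ⟨p, hp', hnz, hcn⟩
          · obtain rfl := List.mem_singleton.1 hpc
            exact absurd hnz hnzc
      · intro r
        rw [hseen r]
        constructor
        · rintro ⟨p, hp, hnz, hl⟩
          exact ⟨p, by simp [hp], hnz, hl⟩
        · rintro ⟨p, hp, hnz, hl⟩
          rcases List.mem_append.1 hp with hp' | hpc
          · exact ⟨p, hp', hnz, hl⟩
          · obtain rfl := List.mem_singleton.1 hpc
            exact absurd hnz hnzc

-- ===== VERDICT (by name: the statement is the Claim_ definition above) =====
theorem get_river_sizes_spec : Claim_equal_get_river_sizes := by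
  intro matrix _ _
  unfold Spec_get_river_sizes
  rw [pvA_eq, pvAlt_eq]
  refine pvMain matrix (pvCells matrix) [] _ [] PySem.Set.empty (by simp) (pvShapeOk_init matrix)
    ?_ ?_
  · intro q hq
    simp only [List.not_mem_nil, false_and, exists_false, iff_false]
    exact pvVisP_init (pvNz_valid hq)
  · intro r
    simp [PySem.Set.empty]
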